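-- pv_equiv track=rewrite | github.com/LuisBaltazarS/examenTecnicoSoyCalidad | PruebaTecnicaEjercicio2.py | ejercicio2
-- ===== SOURCE A (Python) =====
-- def ejercicio2(n):
--
--     if ( n < pow(10, 6) ):
--
--         # Lista de numeros pares que sumen n
--         lista_pares_suma_n = []
--
--         # Necesitamos todos los numeros pares.
--         for i in range(0, n + 1, 2):
--             # Luego todos los numeros pares nuevamente para verificar quien suma n
--             for a in range(0, n + 1, 2):
--                 # Verificamos si la suma de uno de estos numeros da n
--                 if( a + i == n ):
--                     lista_pares_suma_n.append([ a, i ])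
--
--         return lista_pares_suma_n
--
--     else:
--
--         return None
-- ===== SOURCE B (Python) =====
-- def ejercicio2(n):
--     if n >= 10 ** 6:
--         return None
--     if n < 0 or n % 2 != 0:
--         return []
--     return [[n - i, i] for i in range(0, n + 1, 2)]
-- ===== Notes on version B (the rewrite author's own statement) =====
-- stated objective: faster
-- what changed: Replaced the nested scan over all even pairs (a,i) by a single comprehension that computes the unique partner a = n - i for each even i (after ruling out negative and odd n, where the result is empty).
import Mathlib
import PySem

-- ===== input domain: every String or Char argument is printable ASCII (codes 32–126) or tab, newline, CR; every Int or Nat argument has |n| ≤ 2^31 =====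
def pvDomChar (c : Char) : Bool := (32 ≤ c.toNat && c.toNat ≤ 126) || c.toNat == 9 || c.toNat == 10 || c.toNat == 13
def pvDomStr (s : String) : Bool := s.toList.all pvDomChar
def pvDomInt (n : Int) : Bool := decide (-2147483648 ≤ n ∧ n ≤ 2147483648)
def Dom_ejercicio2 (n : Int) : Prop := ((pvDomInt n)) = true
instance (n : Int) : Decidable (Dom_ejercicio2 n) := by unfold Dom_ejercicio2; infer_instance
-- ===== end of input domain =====

-- B replaces A's quadratic double scan over even numbers by one linear pass pairing each even i with n - i (objective: faster).

-- ===== PORT A =====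
def ejercicio2 (n : Int) : Option (List (List Int)) :=
  if n < 10 ^ 6 then
    some ((PySem.List.pyRange 0 (n + 1) 2).foldl
      (fun acc i =>
        (PySem.List.pyRange 0 (n + 1) 2).foldl
          (fun acc2 a => if a + i = n then acc2 ++ [[a, i]] else acc2) acc)
      [])
  else
    none

-- ===== PORT B =====
def ejercicio2_alt (n : Int) : Option (List (List Int)) :=
  if 10 ^ 6 ≤ n then none
  else if n < 0 ∨ PySem.Int.mod n 2 ≠ 0 then some []
  else some ((PySem.List.pyRange 0 (n + 1) 2).map (fun i => [n - i, i]))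

-- ===== PRECONDITION & SPEC =====
def Spec_ejercicio2 (n : Int) (out : Option (List (List Int))) : Prop := out = ejercicio2_alt n
instance (n : Int) (out : Option (List (List Int))) : Decidable (Spec_ejercicio2 n out) := by unfold Spec_ejercicio2; infer_instance

-- ===== CLAIM (what is proved, stated in full; the proofs are below) =====
def Claim_equal_ejercicio2 : Prop := ∀ (n : Int), Dom_ejercicio2 n → Spec_ejercicio2 n (ejercicio2 n)

-- ===== LEMMAS AND PROOFS =====

-- `pyRange 0 b 2` lists distinct values, so A's inner scan finds its match at most once.
theorem nodup_pyRange_two (b : Int) : (PySem.List.pyRange 0 b 2).Nodup := by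
  rw [PySem.List.pyRange_of_pos 0 b (by norm_num)]
  refine List.Nodup.map ?_ List.nodup_range
  intro x y h
  simp only [zero_add] at h
  omega

-- The inner scan of A keeps exactly the unique even partner of i (when it is in range).
theorem inner_filter (n i : Int) :
    (PySem.List.pyRange 0 (n + 1) 2).filter (fun a => decide (a + i = n)) =
      if n - i ∈ PySem.List.pyRange 0 (n + 1) 2 then [n - i] else [] := by
  rw [List.filter_congr (q := fun a => decide (a = n - i)) (by intro a _; simp; omega)]
  rw [List.filter_eq]
  by_cases h : n - i ∈ PySem.List.pyRange 0 (n + 1) 2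
  · rw [List.count_eq_one_of_mem (nodup_pyRange_two (n + 1)) h, if_pos h]
    rfl
  · rw [List.count_eq_zero_of_not_mem h, if_neg h]
    rfl

theorem ejercicio2_spec : Claim_equal_ejercicio2 := by
  intro n _
  unfold Spec_ejercicio2 ejercicio2 ejercicio2_alt
  by_cases hlt : n < 10 ^ 6
  · rw [if_pos hlt, if_neg (by omega)]
    simp only [PySem.List.foldl_append_ite (fun a => a + _ = n) (fun a => [a, _]),
      PySem.List.foldl_append_eq_flatMap, List.nil_append]
    by_cases hneg : n < 0
    · rw [if_pos (Or.inl hneg)]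
      rw [PySem.List.pyRange_of_pos 0 (n + 1) (by norm_num), if_neg (by omega)]
      simp
    · have h2 := PySem.Int.mod_eq_zero_iff_dvd n 2
      by_cases hev : PySem.Int.mod n 2 = 0
      · -- n ≥ 0 even: every even i ≤ n has its partner n - i in range
        rw [if_neg (fun h => h.elim hneg (fun h => h hev))]
        rw [List.flatMap_congr (g := fun i => [[n - i, i]]) ?_]
        · rw [← List.map_eq_flatMap]
        · intro i hi
          rw [PySem.List.mem_pyRange_iff_of_pos (by norm_num)] at hi
          obtain ⟨h0, h1, hdvd⟩ := hi
          rw [inner_filter, if_pos ?_]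
          · rfl
          · rw [PySem.List.mem_pyRange_iff_of_pos (by norm_num)]
            have hn : (2 : Int) ∣ n := h2.mp hev
            refine ⟨by omega, by omega, ?_⟩
            simpa using dvd_sub hn hdvd
      · -- n odd: no pair of evens sums to n
        rw [if_pos (Or.inr hev)]
        rw [List.flatMap_congr (g := fun _ => ([] : List (List Int))) ?_]
        · simp
        · intro i hi
          rw [PySem.List.mem_pyRange_iff_of_pos (by norm_num)] at hi
          obtain ⟨h0, h1, hdvd⟩ := hi
          rw [inner_filter, if_neg ?_]
          · rfl
          · rw [PySem.List.mem_pyRange_iff_of_pos (by norm_num)]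
            rintro ⟨-, -, hd⟩
            exact hev (h2.mpr (by have := dvd_add (by simpa using hd) hdvd; simpa using this))
  · rw [if_neg hlt, if_pos (by omega)]
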